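-- pv_equiv track=rewrite | github.com/pranjal2021080/Intorduction-to-Programming | Assignment-2/Code/2021080_q3.py | find_signature_stats
-- ===== SOURCE A (Python) =====
-- def find_signature_stats(yearbook):
--     """Find students with most and least signatures"""
--     signature_counts = {}
--
--     # Count signatures for each student
--     for student, signatures in yearbook.items():
--         count = sum(signatures.values())
--         signature_counts[student] = count
--
--     # Find max and min counts
--     max_count = max(signature_counts.values())
--     min_count = min(signature_counts.values())
--
--     # Find students with max and min counts
--     most_signatures = [student for student, count in signature_counts.items()
--                       if count == max_count]
--     least_signatures = [student for student, count in signature_counts.items()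
--                        if count == min_count]
--
--     return most_signatures, least_signatures
-- ===== SOURCE B (Python) =====
-- def find_signature_stats(yearbook):
--     """Find students with most and least signatures (single pass, running extremes)."""
--     most, least = [], []
--     max_count = min_count = None
--     for student, signatures in yearbook.items():
--         count = sum(signatures.values())
--         if max_count is None or count > max_count:
--             max_count = count
--             most = [student]
--         elif count == max_count:
--             most.append(student)
--         if min_count is None or count < min_count:
--             min_count = count
--             least = [student]
--         elif count == min_count:
--             least.append(student)
--     return most, least
-- ===== Notes on version B (the rewrite author's own statement) =====
-- stated objective: alternative
-- what changed: Replaces A's intermediate count-dictionary plus four separate scans (max, min, two filter passes) by a single loop that keeps running max/min counts and the current lists of extremal students, resetting on a strict new extreme and appending on ties.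
import Mathlib
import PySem

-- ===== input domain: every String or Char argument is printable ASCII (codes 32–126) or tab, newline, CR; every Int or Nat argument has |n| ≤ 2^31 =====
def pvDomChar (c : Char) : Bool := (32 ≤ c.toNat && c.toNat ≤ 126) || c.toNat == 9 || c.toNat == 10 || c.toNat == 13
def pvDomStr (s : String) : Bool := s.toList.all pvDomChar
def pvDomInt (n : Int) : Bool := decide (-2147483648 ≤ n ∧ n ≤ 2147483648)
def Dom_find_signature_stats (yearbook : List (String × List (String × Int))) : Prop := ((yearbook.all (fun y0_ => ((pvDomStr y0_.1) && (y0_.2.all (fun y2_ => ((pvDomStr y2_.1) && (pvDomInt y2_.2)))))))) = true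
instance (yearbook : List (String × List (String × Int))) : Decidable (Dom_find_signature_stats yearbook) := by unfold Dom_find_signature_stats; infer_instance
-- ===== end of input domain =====

-- B changes the decomposition only: one running-extremes pass instead of A's count table plus four scans
-- (same result on every input Pre_ admits).

-- shared line of both Pythons: 'sum(signatures.values())' where signatures is a dict
def sumValues (sigs : List (String × Int)) : Int :=
  (PySem.Dict.values (PySem.Dict.ofList sigs)).foldl (· + ·) 0

-- ===== PORT A =====
-- signature_counts = {}; for student, signatures in yearbook.items(): signature_counts[student] = sum(signatures.values())
def sigCounts (yearbook : List (String × List (String × Int))) : PySem.Dict String Int :=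
  yearbook.foldl (fun d p => d.insert p.1 (sumValues p.2)) PySem.Dict.empty

def find_signature_stats (yearbook : List (String × List (String × Int))) : List String × List String :=
  -- max_count = max(...); min_count = min(...)  (raise on an empty dict: excluded by Pre_)
  match PySem.List.max? (sigCounts yearbook).values (fun v => v),
        PySem.List.min? (sigCounts yearbook).values (fun v => v) with
  | some max_count, some min_count =>
      (((sigCounts yearbook).items.filter (fun p => p.2 == max_count)).map Prod.fst,
       ((sigCounts yearbook).items.filter (fun p => p.2 == min_count)).map Prod.fst)
  | _, _ => ([], [])

-- ===== PORT B =====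
def altStep (st : Option Int × List String × Option Int × List String)
    (p : String × List (String × Int)) : Option Int × List String × Option Int × List String :=
  let count := sumValues p.2
  let (max_count, most, min_count, least) := st
  let (max_count, most) :=
    match max_count with
    | none => (some count, [p.1])
    | some M => if count > M then (some count, [p.1])
                else if count == M then (some M, most ++ [p.1]) else (some M, most)
  let (min_count, least) :=
    match min_count with
    | none => (some count, [p.1])
    | some m => if count < m then (some count, [p.1])
                else if count == m then (some m, least ++ [p.1]) else (some m, least)
  (max_count, most, min_count, least)

def find_signature_stats_alt (yearbook : List (String × List (String × Int))) : List String × List String :=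
  match yearbook.foldl altStep (none, [], none, []) with
  | (_, most, _, least) => (most, least)

-- ===== PRECONDITION & SPEC =====
-- Pre_ excludes the empty yearbook, on which A's max() raises ValueError, and association lists with
-- duplicate student keys, which cannot arise from A's dict parameter (a Python dict has unique keys).
def Pre_find_signature_stats (yearbook : List (String × List (String × Int))) : Prop :=
  yearbook ≠ [] ∧ (yearbook.map Prod.fst).Nodup
instance (yearbook : List (String × List (String × Int))) : Decidable (Pre_find_signature_stats yearbook) := by unfold Pre_find_signature_stats; infer_instance
def pvWitness_find_signature_stats : (List (String × List (String × Int))) :=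
  [("alice", [("bob", 2), ("carl", 1)]), ("dora", [("eve", 5)])]

def Spec_find_signature_stats (yearbook : List (String × List (String × Int))) (out : List String × List String) : Prop := out = find_signature_stats_alt yearbook
instance (yearbook : List (String × List (String × Int))) (out : List String × List String) : Decidable (Spec_find_signature_stats yearbook out) := by unfold Spec_find_signature_stats; infer_instance

-- ===== CLAIM (what is proved, stated in full; the proofs are below) =====
def Claim_equal_find_signature_stats : Prop := ∀ (yearbook : List (String × List (String × Int))), Dom_find_signature_stats yearbook → Pre_find_signature_stats yearbook → Spec_find_signature_stats yearbook (find_signature_stats yearbook)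

-- ===== LEMMAS AND PROOFS =====

-- the per-student count list both programs are about
def countsL (yearbook : List (String × List (String × Int))) : List (String × Int) :=
  yearbook.map (fun p => (p.1, sumValues p.2))

-- invariant of B's single pass: the running extremes are the extremes of the prefix processed so far,
-- and the running lists are the extremal students of that prefix in order
theorem altStep_fold_spec (yearbook : List (String × List (String × Int)))
    (h : yearbook ≠ []) :
    ∃ M m,
      yearbook.foldl altStep (none, [], none, []) =
        (some M, ((countsL yearbook).filter (fun p => p.2 == M)).map Prod.fst,
         some m, ((countsL yearbook).filter (fun p => p.2 == m)).map Prod.fst)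
      ∧ M ∈ (countsL yearbook).map Prod.snd ∧ (∀ y ∈ (countsL yearbook).map Prod.snd, y ≤ M)
      ∧ m ∈ (countsL yearbook).map Prod.snd ∧ (∀ y ∈ (countsL yearbook).map Prod.snd, m ≤ y) := by
  induction yearbook using List.reverseRecOn with
  | nil => exact absurd rfl h
  | append_singleton l x ih =>
    rw [List.foldl_append]
    by_cases hl : l = []
    · subst hl
      refine ⟨sumValues x.2, sumValues x.2, ?_⟩
      simp [altStep, countsL]
    · obtain ⟨M, m, heq, hMmem, hMmax, hmmem, hmmin⟩ := ih hl
      rw [heq]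
      have hmM : m ≤ M := hmmin M hMmem
      have hcnt : countsL (l ++ [x]) = countsL l ++ [(x.1, sumValues x.2)] := by
        simp [countsL]
      have hsnd : (countsL (l ++ [x])).map Prod.snd
          = (countsL l).map Prod.snd ++ [sumValues x.2] := by
        rw [hcnt]; simp
      have hfilz : ∀ v : Int, (M < v ∨ v < m) →
          (countsL l).filter (fun p => p.2 == v) = [] := by
        intro v hv
        rw [List.filter_eq_nil_iff]
        intro p hp
        have h1 := hMmax p.2 (List.mem_map_of_mem hp)
        have h2 := hmmin p.2 (List.mem_map_of_mem hp)
        simp only [beq_iff_eq]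
        omega
      simp only [List.foldl_cons, List.foldl_nil, altStep]
      split_ifs with h1 h3 h4 h2 h3 h4 h3 h4 <;>
        simp only [beq_iff_eq] at *
      -- h1 : c > M; h2 : c = M; h3 : c < m; h4 : c = m   (c := sumValues x.2)
      · omega  -- c > M ∧ c < m contradicts m ≤ M
      · omega  -- c > M ∧ c = m contradicts m ≤ M
      · -- new strict max, min untouched
        refine ⟨sumValues x.2, m, ?_, ?_, ?_, ?_, ?_⟩
        · rw [hcnt, List.filter_append, List.filter_append,
             hfilz _ (Or.inl h1)]
          simp [h4]
        · rw [hsnd]; exact List.mem_append.mpr (Or.inr (by simp))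
        · rw [hsnd]; intro y hy
          rcases List.mem_append.mp hy with hy | hy
          · have := hMmax y hy; omega
          · simp at hy; omega
        · rw [hsnd]; exact List.mem_append.mpr (Or.inl hmmem)
        · rw [hsnd]; intro y hy
          rcases List.mem_append.mp hy with hy | hy
          · exact hmmin y hy
          · simp at hy; omega
      · omega  -- c = M ∧ c < m contradicts m ≤ M
      · -- c = M = m : everything ties
        have hMm : M = m := by omega
        subst hMm
        refine ⟨M, M, ?_, ?_, ?_, ?_, ?_⟩
        · rw [hcnt, List.filter_append]
          simp [h2]
        · rw [hsnd]; exact List.mem_append.mpr (Or.inl hMmem)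
        · rw [hsnd]; intro y hy
          rcases List.mem_append.mp hy with hy | hy
          · exact hMmax y hy
          · simp at hy; omega
        · rw [hsnd]; exact List.mem_append.mpr (Or.inl hmmem)
        · rw [hsnd]; intro y hy
          rcases List.mem_append.mp hy with hy | hy
          · exact hmmin y hy
          · simp at hy; omega
      · -- c = M, c ≠ m : tie at the max only
        refine ⟨M, m, ?_, ?_, ?_, ?_, ?_⟩
        · rw [hcnt, List.filter_append, List.filter_append]
          simp [h2]; omega
        · rw [hsnd]; exact List.mem_append.mpr (Or.inl hMmem)
        · rw [hsnd]; intro y hy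
          rcases List.mem_append.mp hy with hy | hy
          · exact hMmax y hy
          · simp at hy; omega
        · rw [hsnd]; exact List.mem_append.mpr (Or.inl hmmem)
        · rw [hsnd]; intro y hy
          rcases List.mem_append.mp hy with hy | hy
          · exact hmmin y hy
          · simp at hy; omega
      · -- new strict min, max untouched
        refine ⟨M, sumValues x.2, ?_, ?_, ?_, ?_, ?_⟩
        · rw [hcnt, List.filter_append, List.filter_append,
             hfilz _ (Or.inr h3)]
          simp [h2]
        · rw [hsnd]; exact List.mem_append.mpr (Or.inl hMmem)
        · rw [hsnd]; intro y hy
          rcases List.mem_append.mp hy with hy | hy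
          · exact hMmax y hy
          · simp at hy; omega
        · rw [hsnd]; exact List.mem_append.mpr (Or.inr (by simp))
        · rw [hsnd]; intro y hy
          rcases List.mem_append.mp hy with hy | hy
          · have := hmmin y hy; omega
          · simp at hy; omega
      · -- c ≠ M, c = m : tie at the min only
        refine ⟨M, m, ?_, ?_, ?_, ?_, ?_⟩
        · rw [hcnt, List.filter_append, List.filter_append]
          simp [h4]; omega
        · rw [hsnd]; exact List.mem_append.mpr (Or.inl hMmem)
        · rw [hsnd]; intro y hy
          rcases List.mem_append.mp hy with hy | hy
          · exact hMmax y hy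
          · simp at hy; omega
        · rw [hsnd]; exact List.mem_append.mpr (Or.inl hmmem)
        · rw [hsnd]; intro y hy
          rcases List.mem_append.mp hy with hy | hy
          · exact hmmin y hy
          · simp at hy; omega
      · -- strictly between: nothing changes
        refine ⟨M, m, ?_, ?_, ?_, ?_, ?_⟩
        · rw [hcnt, List.filter_append, List.filter_append]
          simp [h2, h4]
        · rw [hsnd]; exact List.mem_append.mpr (Or.inl hMmem)
        · rw [hsnd]; intro y hy
          rcases List.mem_append.mp hy with hy | hy
          · exact hMmax y hy
          · simp at hy; omega
        · rw [hsnd]; exact List.mem_append.mpr (Or.inl hmmem)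
        · rw [hsnd]; intro y hy
          rcases List.mem_append.mp hy with hy | hy
          · exact hmmin y hy
          · simp at hy; omega

-- ===== VERDICT (by name: the statement is the Claim_ definition above) =====
theorem find_signature_stats_spec : Claim_equal_find_signature_stats := by
  intro yearbook _ hpre
  obtain ⟨hne, hnd⟩ := hpre
  unfold Spec_find_signature_stats find_signature_stats find_signature_stats_alt
  have hitems : (sigCounts yearbook).items = countsL yearbook := by
    unfold sigCounts
    have := PySem.Dict.items_foldl_insert_fresh (l := yearbook)
      (d := (PySem.Dict.empty : PySem.Dict String Int))
      (k := Prod.fst) (v := fun p => sumValues p.2)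
      (fun a _ => PySem.Dict.contains_empty a.1) hnd
    simpa [countsL] using this
  have hvals : (sigCounts yearbook).values = (countsL yearbook).map Prod.snd := by
    simp only [PySem.Dict.values, hitems]
  obtain ⟨M, m, hB, hMmem, hMmax, hmmem, hmmin⟩ := altStep_fold_spec yearbook hne
  rw [hB, hvals, hitems]
  cases hmax : PySem.List.max? ((countsL yearbook).map Prod.snd) (fun v => v) with
  | none =>
    exfalso
    rw [PySem.List.max?_eq_none_iff] at hmax
    exact hne (by simpa [countsL] using List.map_eq_nil_iff.mp hmax)
  | some maxc =>
    cases hmin : PySem.List.min? ((countsL yearbook).map Prod.snd) (fun v => v) with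
    | none =>
      exfalso
      rw [PySem.List.min?_eq_none_iff] at hmin
      exact hne (by simpa [countsL] using List.map_eq_nil_iff.mp hmin)
    | some minc =>
      have hM : maxc = M := by
        have h1 : maxc ≤ M := hMmax maxc (PySem.List.max?_mem hmax)
        have h2 : M ≤ maxc := PySem.List.max?_isMax hmax M hMmem
        omega
      have hm : minc = m := by
        have h1 : m ≤ minc := hmmin minc (PySem.List.min?_mem hmin)
        have h2 : minc ≤ m := PySem.List.min?_isMin hmin m hmmem
        omega
      rw [hM, hm]
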